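-- pv_equiv track=rewrite | github.com/mani319/DSA | arrays/sub_arrays/largest_subarray_with_contiguous_sequence.py | largest_subarray_with_contiguous_sequence_distinct_elements
-- ===== SOURCE A (Python) =====
-- def largest_subarray_with_contiguous_sequence_distinct_elements(arr):
--     n = len(arr)
--     max_len = 0
--
--     for i in range(n-1):
--         maxi = arr[i]
--         mini = arr[i]
--
--         for j in range(i+1, n):
--             maxi = max(arr[j], maxi)
--             mini = min(arr[j], mini)
--
--             if(maxi-mini == j-i):
--                 max_len = max(maxi-mini+1, max_len)
--
--     return max_len
-- ===== SOURCE B (Python) =====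
-- def largest_subarray_with_contiguous_sequence_distinct_elements(arr):
--     n = len(arr)
--     max_len = 0
--     for i in range(n):
--         for j in range(i + 1, n):
--             window = arr[i:j + 1]
--             if max(window) - min(window) == j - i:
--                 max_len = max(max_len, j - i + 1)
--     return max_len
-- ===== Notes on version B (the rewrite author's own statement) =====
-- stated objective: simpler
-- what changed: B drops A's running maxi/mini accumulator state and instead recomputes each window's extrema directly from the slice arr[i:j+1] with max()/min(), a stateless brute-force rescan over the same pair range.
import Mathlib
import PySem

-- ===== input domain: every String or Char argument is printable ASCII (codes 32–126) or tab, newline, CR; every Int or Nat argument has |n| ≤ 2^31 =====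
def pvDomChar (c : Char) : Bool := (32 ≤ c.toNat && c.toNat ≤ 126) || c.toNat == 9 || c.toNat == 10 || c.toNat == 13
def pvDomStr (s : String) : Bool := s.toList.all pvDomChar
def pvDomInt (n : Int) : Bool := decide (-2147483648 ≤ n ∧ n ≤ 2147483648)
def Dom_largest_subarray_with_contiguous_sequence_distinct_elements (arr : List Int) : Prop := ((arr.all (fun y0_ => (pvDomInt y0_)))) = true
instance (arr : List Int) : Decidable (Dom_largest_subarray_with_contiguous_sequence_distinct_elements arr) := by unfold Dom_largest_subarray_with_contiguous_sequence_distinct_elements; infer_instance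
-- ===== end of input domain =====

-- B replaces A's running maxi/mini state by a stateless rescan of the slice arr[i:j+1] (simpler, not faster).

-- ===== PORT A =====
def largest_subarray_with_contiguous_sequence_distinct_elements (arr : List Int) : Int :=
  let n : Int := arr.length
  (PySem.List.pyRange 0 (n - 1) 1).foldl
    (fun max_len i =>
      let ai := PySem.List.pyGetD arr i 0
      let s := (PySem.List.pyRange (i + 1) n 1).foldl
        (fun (st : Int × Int × Int) j =>
          let maxi := max (PySem.List.pyGetD arr j 0) st.1
          let mini := min (PySem.List.pyGetD arr j 0) st.2.1
          let ml := if maxi - mini = j - i then max (maxi - mini + 1) st.2.2 else st.2.2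
          (maxi, mini, ml))
        (ai, ai, max_len)
      s.2.2)
    0

-- ===== PORT B =====
def largest_subarray_with_contiguous_sequence_distinct_elements_alt (arr : List Int) : Int :=
  let n : Int := arr.length
  (PySem.List.pyRange 0 n 1).foldl
    (fun max_len i =>
      (PySem.List.pyRange (i + 1) n 1).foldl
        (fun ml j =>
          let w := PySem.List.slice arr (some i) (some (j + 1))
          if (PySem.List.max? w (fun y => y)).getD 0 - (PySem.List.min? w (fun y => y)).getD 0 = j - i
          then max ml (j - i + 1) else ml)
        max_len)
    0

-- ===== PRECONDITION & SPEC =====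
def Spec_largest_subarray_with_contiguous_sequence_distinct_elements (arr : List Int) (out : Int) : Prop := out = largest_subarray_with_contiguous_sequence_distinct_elements_alt arr
instance (arr : List Int) (out : Int) : Decidable (Spec_largest_subarray_with_contiguous_sequence_distinct_elements arr out) := by unfold Spec_largest_subarray_with_contiguous_sequence_distinct_elements; infer_instance

-- ===== CLAIM (what is proved, stated in full; the proofs are below) =====
def Claim_equal_largest_subarray_with_contiguous_sequence_distinct_elements : Prop := ∀ (arr : List Int), Dom_largest_subarray_with_contiguous_sequence_distinct_elements arr → Spec_largest_subarray_with_contiguous_sequence_distinct_elements arr (largest_subarray_with_contiguous_sequence_distinct_elements arr)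

-- ===== LEMMAS AND PROOFS =====
theorem pv_slice_succ (arr : List Int) (i j : Int) (h0 : 0 ≤ i) (hij : i ≤ j)
    (hj : j < (arr.length : Int)) :
    PySem.List.slice arr (some i) (some (j + 1))
      = PySem.List.slice arr (some i) (some j) ++ [PySem.List.pyGetD arr j 0] := by
  have hjn : j.toNat < arr.length := by omega
  rw [PySem.List.slice_toNat _ h0 (by omega), PySem.List.slice_toNat _ h0 (by omega)]
  have h1 : (j + 1).toNat - i.toNat = (j.toNat - i.toNat) + 1 := by omega
  rw [h1, List.take_add_one, List.getElem?_drop]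
  have h2 : i.toNat + (j.toNat - i.toNat) = j.toNat := by omega
  have h3 : PySem.List.pyGetD arr j 0 = arr[j.toNat] :=
    PySem.List.pyGetD_eq_getElem arr 0 (by omega) hj
  rw [h2, h3]
  simp [List.getElem?_eq_getElem hjn]

theorem pv_max_append (xs : List Int) (m y : Int)
    (h : PySem.List.max? xs (fun a => a) = some m) :
    PySem.List.max? (xs ++ [y]) (fun a => a) = some (max y m) := by
  cases xs with
  | nil => simp [PySem.List.max?] at h
  | cons x t =>
    rw [PySem.List.max?_id_cons] at h
    rw [List.cons_append, PySem.List.max?_id_cons, List.foldl_append]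
    injection h with h
    simp only [List.foldl_cons, List.foldl_nil, h, max_comm]

theorem pv_min_append (xs : List Int) (m y : Int)
    (h : PySem.List.min? xs (fun a => a) = some m) :
    PySem.List.min? (xs ++ [y]) (fun a => a) = some (min y m) := by
  cases xs with
  | nil => simp [PySem.List.min?] at h
  | cons x t =>
    rw [PySem.List.min?_id_cons] at h
    rw [List.cons_append, PySem.List.min?_id_cons, List.foldl_append]
    injection h with h
    simp only [List.foldl_cons, List.foldl_nil, h, min_comm]

theorem pv_inner (arr : List Int) (i : Int) (h0 : 0 ≤ i) :
    ∀ (k : Nat) (b : Int), i < b → b ≤ (arr.length : Int) → k = ((arr.length : Int) - b).toNat →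
    ∀ (maxi mini ml : Int),
      (PySem.List.max? (PySem.List.slice arr (some i) (some b)) (fun y => y)) = some maxi →
      (PySem.List.min? (PySem.List.slice arr (some i) (some b)) (fun y => y)) = some mini →
      ((PySem.List.pyRange b (arr.length : Int) 1).foldl
        (fun (st : Int × Int × Int) j =>
          let maxi := max (PySem.List.pyGetD arr j 0) st.1
          let mini := min (PySem.List.pyGetD arr j 0) st.2.1
          let ml := if maxi - mini = j - i then max (maxi - mini + 1) st.2.2 else st.2.2
          (maxi, mini, ml))
        (maxi, mini, ml)).2.2
      = (PySem.List.pyRange b (arr.length : Int) 1).foldl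
        (fun ml j =>
          let w := PySem.List.slice arr (some i) (some (j + 1))
          if (PySem.List.max? w (fun y => y)).getD 0 - (PySem.List.min? w (fun y => y)).getD 0 = j - i
          then max ml (j - i + 1) else ml)
        ml := by
  intro k
  induction k with
  | zero =>
    intro b hib hble hk maxi mini ml hmax hmin
    have hb : b = (arr.length : Int) := by omega
    rw [hb, PySem.List.pyRange_one_eq_nil le_rfl]
    simp
  | succ k ih =>
    intro b hib hble hk maxi mini ml hmax hmin
    have hblt : b < (arr.length : Int) := by omega
    rw [PySem.List.pyRange_one_cons hblt]
    simp only [List.foldl_cons]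
    have hslice := pv_slice_succ arr i b h0 (by omega) hblt
    have hmax' := pv_max_append _ _ (PySem.List.pyGetD arr b 0) hmax
    have hmin' := pv_min_append _ _ (PySem.List.pyGetD arr b 0) hmin
    rw [← hslice] at hmax' hmin'
    have hml :
        (if max (PySem.List.pyGetD arr b 0) maxi - min (PySem.List.pyGetD arr b 0) mini = b - i
          then max (max (PySem.List.pyGetD arr b 0) maxi - min (PySem.List.pyGetD arr b 0) mini + 1) ml else ml)
        = (if (PySem.List.max? (PySem.List.slice arr (some i) (some (b + 1))) (fun y => y)).getD 0
              - (PySem.List.min? (PySem.List.slice arr (some i) (some (b + 1))) (fun y => y)).getD 0 = b - i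
          then max ml (b - i + 1) else ml) := by
      rw [hmax', hmin']
      simp only [Option.getD_some]
      split_ifs with h
      · rw [h, max_comm]
      · rfl
    calc ((PySem.List.pyRange (b+1) (arr.length : Int) 1).foldl
        (fun (st : Int × Int × Int) j =>
          let maxi := max (PySem.List.pyGetD arr j 0) st.1
          let mini := min (PySem.List.pyGetD arr j 0) st.2.1
          let ml := if maxi - mini = j - i then max (maxi - mini + 1) st.2.2 else st.2.2
          (maxi, mini, ml))
        (max (PySem.List.pyGetD arr b 0) maxi, min (PySem.List.pyGetD arr b 0) mini,
          if max (PySem.List.pyGetD arr b 0) maxi - min (PySem.List.pyGetD arr b 0) mini = b - i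
          then max (max (PySem.List.pyGetD arr b 0) maxi - min (PySem.List.pyGetD arr b 0) mini + 1) ml else ml)).2.2
        = (PySem.List.pyRange (b+1) (arr.length : Int) 1).foldl
          (fun ml j =>
            let w := PySem.List.slice arr (some i) (some (j + 1))
            if (PySem.List.max? w (fun y => y)).getD 0 - (PySem.List.min? w (fun y => y)).getD 0 = j - i
            then max ml (j - i + 1) else ml)
          (if (PySem.List.max? (PySem.List.slice arr (some i) (some (b + 1))) (fun y => y)).getD 0
              - (PySem.List.min? (PySem.List.slice arr (some i) (some (b + 1))) (fun y => y)).getD 0 = b - i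
            then max ml (b - i + 1) else ml) := by
          rw [← hml]
          exact ih (b+1) (by omega) (by omega) (by omega) _ _ _ hmax' hmin'
      _ = _ := rfl

theorem pv_slice_single (arr : List Int) (i : Int) (h0 : 0 ≤ i) (hi : i < (arr.length : Int)) :
    PySem.List.slice arr (some i) (some (i + 1)) = [PySem.List.pyGetD arr i 0] := by
  have h := pv_slice_succ arr i i h0 le_rfl hi
  have h2 : PySem.List.slice arr (some i) (some i) = [] := by
    rw [PySem.List.slice_toNat _ h0 h0]
    simp
  rw [h, h2, List.nil_append]

theorem pv_outer (arr : List Int) :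
    ∀ (k : Nat) (i : Int), 0 ≤ i → k = ((arr.length : Int) - i).toNat →
    ∀ ml : Int,
    (PySem.List.pyRange i ((arr.length : Int) - 1) 1).foldl
      (fun max_len i =>
        let ai := PySem.List.pyGetD arr i 0
        let s := (PySem.List.pyRange (i + 1) (arr.length : Int) 1).foldl
          (fun (st : Int × Int × Int) j =>
            let maxi := max (PySem.List.pyGetD arr j 0) st.1
            let mini := min (PySem.List.pyGetD arr j 0) st.2.1
            let ml := if maxi - mini = j - i then max (maxi - mini + 1) st.2.2 else st.2.2
            (maxi, mini, ml))
          (ai, ai, max_len)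
        s.2.2) ml
    = (PySem.List.pyRange i (arr.length : Int) 1).foldl
      (fun max_len i =>
        (PySem.List.pyRange (i + 1) (arr.length : Int) 1).foldl
          (fun ml j =>
            let w := PySem.List.slice arr (some i) (some (j + 1))
            if (PySem.List.max? w (fun y => y)).getD 0 - (PySem.List.min? w (fun y => y)).getD 0 = j - i
            then max ml (j - i + 1) else ml)
          max_len) ml := by
  intro k
  induction k with
  | zero =>
    intro i h0 hk ml
    rw [PySem.List.pyRange_one_eq_nil (show (arr.length : Int) - 1 ≤ i by omega),
        PySem.List.pyRange_one_eq_nil (show (arr.length : Int) ≤ i by omega)]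
    rfl
  | succ k ih =>
    intro i h0 hk ml
    have hlt : i < (arr.length : Int) := by omega
    by_cases hi : (arr.length : Int) - 1 ≤ i
    · rw [PySem.List.pyRange_one_eq_nil hi, PySem.List.pyRange_one_cons hlt,
          PySem.List.pyRange_one_eq_nil (show (arr.length : Int) ≤ i + 1 by omega)]
      simp only [List.foldl_cons, List.foldl_nil]
      rw [PySem.List.pyRange_one_eq_nil (show (arr.length : Int) ≤ i + 1 by omega)]
      rfl
    · have hmax : PySem.List.max? (PySem.List.slice arr (some i) (some (i + 1))) (fun y => y)
          = some (PySem.List.pyGetD arr i 0) := by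
        rw [pv_slice_single arr i h0 hlt, PySem.List.max?_id_cons]
        simp
      have hmin : PySem.List.min? (PySem.List.slice arr (some i) (some (i + 1))) (fun y => y)
          = some (PySem.List.pyGetD arr i 0) := by
        rw [pv_slice_single arr i h0 hlt, PySem.List.min?_id_cons]
        simp
      rw [PySem.List.pyRange_one_cons (show i < (arr.length : Int) - 1 by omega),
          PySem.List.pyRange_one_cons hlt]
      simp only [List.foldl_cons]
      have hstep := pv_inner arr i h0 ((arr.length : Int) - (i + 1)).toNat (i + 1)
        (by omega) (by omega) rfl (PySem.List.pyGetD arr i 0) (PySem.List.pyGetD arr i 0) ml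
        hmax hmin
      rw [hstep]
      exact ih (i + 1) (by omega) (by omega) _

-- ===== VERDICT (by name: the statement is the Claim_ definition above) =====
theorem largest_subarray_with_contiguous_sequence_distinct_elements_spec : Claim_equal_largest_subarray_with_contiguous_sequence_distinct_elements := by
  intro arr _
  unfold Spec_largest_subarray_with_contiguous_sequence_distinct_elements
  exact pv_outer arr ((arr.length : Int) - 0).toNat 0 le_rfl rfl 0
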